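-- pv_equiv track=rewrite | github.com/H3LL0U/background_remover_osu- | background_remover_functions.py | change_dot_osu_file_background_text
-- ===== SOURCE A (Python) =====
-- def change_dot_osu_file_background_text(old_lines:list[str],new_text:str) ->list[str]:
--     '''
--     Takes in a list of lines from the .osu! file and returns a new list of lines for //Background and Video events which the new
--     .osu file should contain
--     '''
--     count_idx = False
--     indexes_to_remove = []
--     start_index = None
--     for idx, line in enumerate(old_lines):
--         if count_idx and not("//" in line):
--             indexes_to_remove.append(idx)
--         elif count_idx and ("//" in line or "[" in line):
--             break
--         if "//Background and Video events" in line: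
--             count_idx = True
--             start_index = idx
--
--     new_lines = [line for idx,line in enumerate(old_lines) if not(idx in indexes_to_remove)]
--     if start_index:
--         new_lines.insert(start_index+1,(new_text+"\n").replace("\n\n","\n"))
--     return new_lines
-- ===== SOURCE B (Python) =====
-- def change_dot_osu_file_background_text(old_lines: list[str], new_text: str) -> list[str]:
--     '''
--     Takes in a list of lines from the .osu! file and returns a new list of lines for //Background and Video events which the new
--     .osu file should contain
--     '''
--     new_lines = []
--     state = 0  # 0 = before the marker, 1 = removing, 2 = done
--     for line in old_lines:
--         if state == 0:
--             new_lines.append(line)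
--             if "//Background and Video events" in line:
--                 new_lines.append((new_text + "\n").replace("\n\n", "\n"))
--                 state = 1
--         elif state == 1:
--             if "//" in line:
--                 new_lines.append(line)
--                 state = 2
--         else:
--             new_lines.append(line)
--     return new_lines
-- ===== Notes on version B (the rewrite author's own statement) =====
-- stated objective: simpler
-- what changed: B builds the output in one forward pass with a three-state flag (before marker / removing / done), appending the new text right after the marker line, instead of A's three phases: collect removal indexes with a break, filter the whole list by index membership, then insert at start_index+1.
-- intended difference: When the marker line is the very first line (index 0), A's 'if start_index:' is falsy at 0 so A silently omits inserting the new background text while still deleting the old event lines; B inserts it there too, which is clearly the intended behaviour. — e.g. on change_dot_osu_file_background_text(["//Background and Video events", "0,0,bg.jpg", "//next"], "bg"): A returns ["//Background and Video events", "//next"], B returns ["//Background and Video events", "bg\n", "//next"]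
import Mathlib
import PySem

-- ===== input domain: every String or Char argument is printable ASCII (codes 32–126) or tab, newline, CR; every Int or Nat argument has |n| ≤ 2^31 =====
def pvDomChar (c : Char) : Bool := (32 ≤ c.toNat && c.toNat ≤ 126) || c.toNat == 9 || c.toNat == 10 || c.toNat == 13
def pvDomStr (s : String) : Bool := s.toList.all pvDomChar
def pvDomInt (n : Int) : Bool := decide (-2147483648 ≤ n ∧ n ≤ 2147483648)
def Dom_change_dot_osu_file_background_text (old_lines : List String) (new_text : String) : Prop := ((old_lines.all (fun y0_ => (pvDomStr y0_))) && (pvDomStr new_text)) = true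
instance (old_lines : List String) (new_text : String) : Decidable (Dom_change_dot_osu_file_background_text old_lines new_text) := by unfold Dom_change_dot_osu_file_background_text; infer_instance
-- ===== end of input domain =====

-- B builds the result in one forward pass with a three-state flag instead of A's
-- collect-removal-indexes / filter / insert three-phase plan (objective: simpler);
-- B always inserts the new text after the marker line, fixing A's falsy-at-zero slip.

-- ===== PORT A =====
-- the loop of A: state (count_idx, indexes_to_remove, start_index); 'break' returns the state
def pvLoopA : List String → Int → Bool → List Int → Option Int → List Int × Option Int
  | [], _, _, acc, start => (acc, start)
  | l :: ls, idx, count_idx, acc, start =>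
    if count_idx && !(PySem.Str.isIn "//" l) then
      -- indexes_to_remove.append(idx), then the marker check of the same iteration
      if PySem.Str.isIn "//Background and Video events" l then
        pvLoopA ls (idx + 1) true (acc ++ [idx]) (some idx)
      else
        pvLoopA ls (idx + 1) count_idx (acc ++ [idx]) start
    else if count_idx && (PySem.Str.isIn "//" l || PySem.Str.isIn "[" l) then
      (acc, start)  -- break
    else if PySem.Str.isIn "//Background and Video events" l then
      pvLoopA ls (idx + 1) true acc (some idx)
    else
      pvLoopA ls (idx + 1) count_idx acc start

def change_dot_osu_file_background_text (old_lines : List String) (new_text : String) : List String :=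
  let st := pvLoopA old_lines 0 false [] none
  let indexes_to_remove := st.1
  let start_index := st.2
  let new_lines := ((PySem.List.enumerate old_lines).filter
      (fun p => !(indexes_to_remove.contains p.1))).map (·.2)
  match start_index with
  | none => new_lines
  | some s =>
    if s ≠ 0 then  -- Python truthiness: 'if start_index:' is false for None and for 0
      PySem.List.insert new_lines (s + 1)
        (String.ofList (PySem.Chars.replace (new_text.toList ++ ['\n']) ['\n', '\n'] ['\n']))
    else new_lines

-- ===== PORT B =====
-- the loop of B: state 0 = before the marker, 1 = removing, 2 = done
def pvLoopB : List String → Nat → String → List String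
  | [], _, _ => []
  | l :: ls, state, txt =>
    if state = 0 then
      if PySem.Str.isIn "//Background and Video events" l then
        l :: txt :: pvLoopB ls 1 txt
      else
        l :: pvLoopB ls 0 txt
    else if state = 1 then
      if PySem.Str.isIn "//" l then l :: pvLoopB ls 2 txt
      else pvLoopB ls 1 txt
    else
      l :: pvLoopB ls 2 txt

def change_dot_osu_file_background_text_alt (old_lines : List String) (new_text : String) : List String :=
  pvLoopB old_lines 0 (String.ofList (PySem.Chars.replace (new_text.toList ++ ['\n']) ['\n', '\n'] ['\n']))

-- ===== PRECONDITION & SPEC =====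
-- When the marker line is the very first line (index 0), A's 'if start_index:' is falsy at 0
-- so A silently omits inserting the new background text while still deleting the old event
-- lines; B inserts it there too, which is clearly the intended behaviour.
def D_change_dot_osu_file_background_text (old_lines : List String) (new_text : String) : Prop :=
  PySem.Str.isIn "//Background and Video events" (old_lines.headD "") = true
instance (old_lines : List String) (new_text : String) : Decidable (D_change_dot_osu_file_background_text old_lines new_text) := by unfold D_change_dot_osu_file_background_text; infer_instance

def Spec_change_dot_osu_file_background_text (old_lines : List String) (new_text : String) (out : List String) : Prop := ¬ D_change_dot_osu_file_background_text old_lines new_text → out = change_dot_osu_file_background_text_alt old_lines new_text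
instance (old_lines : List String) (new_text : String) (out : List String) : Decidable (Spec_change_dot_osu_file_background_text old_lines new_text out) := by unfold Spec_change_dot_osu_file_background_text; infer_instance

def pvDiffWitness_change_dot_osu_file_background_text : List String × String :=
  (["//Background and Video events", "0,0,bg.jpg", "//next"], "bg")
def pvDiffWitnessOut_change_dot_osu_file_background_text : (List String) × (List String) :=
  (["//Background and Video events", "//next"],
   ["//Background and Video events", "bg\n", "//next"])

-- ===== CLAIM (what is proved, stated in full; the proofs are below) =====
def Claim_unchanged_change_dot_osu_file_background_text : Prop := ∀ (old_lines : List String) (new_text : String), Dom_change_dot_osu_file_background_text old_lines new_text → Spec_change_dot_osu_file_background_text old_lines new_text (change_dot_osu_file_background_text old_lines new_text)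
def Claim_changed_change_dot_osu_file_background_text : Prop := Dom_change_dot_osu_file_background_text (pvDiffWitness_change_dot_osu_file_background_text.1) (pvDiffWitness_change_dot_osu_file_background_text.2) ∧ D_change_dot_osu_file_background_text (pvDiffWitness_change_dot_osu_file_background_text.1) (pvDiffWitness_change_dot_osu_file_background_text.2) ∧ change_dot_osu_file_background_text (pvDiffWitness_change_dot_osu_file_background_text.1) (pvDiffWitness_change_dot_osu_file_background_text.2) = pvDiffWitnessOut_change_dot_osu_file_background_text.1 ∧ change_dot_osu_file_background_text_alt (pvDiffWitness_change_dot_osu_file_background_text.1) (pvDiffWitness_change_dot_osu_file_background_text.2) = pvDiffWitnessOut_change_dot_osu_file_background_text.2 ∧ pvDiffWitnessOut_change_dot_osu_file_background_text.1 ≠ pvDiffWitnessOut_change_dot_osu_file_background_text.2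
def Claim_exact_change_dot_osu_file_background_text : Prop := ∀ (old_lines : List String) (new_text : String), Dom_change_dot_osu_file_background_text old_lines new_text → D_change_dot_osu_file_background_text old_lines new_text → change_dot_osu_file_background_text old_lines new_text ≠ change_dot_osu_file_background_text_alt old_lines new_text

-- ===== LEMMAS AND PROOFS =====

-- normal forms shared by both ports
def pvKeep : List String → List String
  | [] => []
  | l :: ls => if PySem.Str.isIn "//" l then l :: ls else pvKeep ls

def pvBad : List String → Int → List Int
  | [], _ => []
  | l :: ls, i => if PySem.Str.isIn "//" l then [] else i :: pvBad ls (i + 1)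

def pvMark : List String → Option (List String × String × List String)
  | [] => none
  | l :: ls =>
    if PySem.Str.isIn "//Background and Video events" l then some ([], l, ls)
    else (pvMark ls).map (fun x => (l :: x.1, x.2.1, x.2.2))

def pvFilt : List String → Int → List Int → List String
  | [], _, _ => []
  | l :: ls, i, rem => if rem.contains i then pvFilt ls (i + 1) rem else l :: pvFilt ls (i + 1) rem

theorem pv_isIn_slashes_of_marker (l : String)
    (h : PySem.Str.isIn "//Background and Video events" l = true) :
    PySem.Str.isIn "//" l = true := by
  rw [PySem.Str.isIn_iff_infix] at h ⊢
  exact List.IsInfix.trans (by decide) h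

theorem pv_mem_bad (r : List String) (i x : Int) (hx : x ∈ pvBad r i) : i ≤ x := by
  induction r generalizing i with
  | nil => simp [pvBad] at hx
  | cons l ls ih =>
    simp only [pvBad] at hx
    split at hx
    · simp at hx
    · rcases List.mem_cons.1 hx with h | h
      · omega
      · have := ih (i + 1) h; omega

theorem pv_loopA_phase2 (r : List String) (i : Int) (acc : List Int) (s : Int) :
    pvLoopA r i true acc (some s) = (acc ++ pvBad r i, some s) := by
  induction r generalizing i acc with
  | nil => simp [pvLoopA, pvBad]
  | cons l ls ih =>
    by_cases h : PySem.Str.isIn "//" l = true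
    · simp at h
      simp [pvLoopA, pvBad, h]
    · have hm : PySem.Str.isIn "//Background and Video events" l = false := by
        cases hm : PySem.Str.isIn "//Background and Video events" l
        · rfl
        · exact absurd (pv_isIn_slashes_of_marker l hm) h
      simp at h hm
      simp [pvLoopA, pvBad, h, hm, ih]

theorem pv_loopA_none (ls : List String) (i : Int) (h : pvMark ls = none) :
    pvLoopA ls i false [] none = ([], none) := by
  induction ls generalizing i with
  | nil => simp [pvLoopA]
  | cons l ls ih =>
    simp only [pvMark] at h
    split at h
    · exact absurd h (by simp)
    · rename_i hm
      have hm' : PySem.Str.isIn "//Background and Video events" l = false := by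
        simpa using hm
      have h' : pvMark ls = none := by
        cases hx : pvMark ls
        · rfl
        · rw [hx] at h; simp at h
      have hm'' := hm'; simp at hm''
      simp [pvLoopA, hm'', ih _ h']

theorem pv_loopA_some (ls : List String) (i : Int) (p : List String) (m : String)
    (r : List String) (h : pvMark ls = some (p, m, r)) :
    pvLoopA ls i false [] none = (pvBad r (i + p.length + 1), some (i + p.length)) := by
  induction ls generalizing i p with
  | nil => simp [pvMark] at h
  | cons l ls ih =>
    simp only [pvMark] at h
    split at h
    · rename_i hm
      simp only [Option.some.injEq, Prod.mk.injEq] at h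
      obtain ⟨hp, hm2, hr⟩ := h
      subst hp hm2 hr
      have hm2 := hm; simp at hm2
      simp [pvLoopA, hm2, pv_loopA_phase2]
    · rename_i hm
      have hm' : PySem.Str.isIn "//Background and Video events" l = false := by
        simpa using hm
      cases hx : pvMark ls with
      | none => rw [hx] at h; simp at h
      | some t =>
        obtain ⟨p', m', r'⟩ := t
        rw [hx] at h
        simp only [Option.map_some, Option.some.injEq, Prod.mk.injEq] at h
        obtain ⟨hp, hm2, hr⟩ := h
        subst hm2 hr
        subst hp
        have hrec := ih (i + 1) p' hx
        have hm'' := hm'; simp at hm''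
        simp only [pvLoopA, Bool.false_and, Bool.false_eq_true, if_false, hrec]
        simp only [List.length_cons]
        push_cast
        ring_nf
        simp [hm'']

theorem pv_mark_decomp (ls : List String) (p : List String) (m : String) (r : List String)
    (h : pvMark ls = some (p, m, r)) : ls = p ++ m :: r := by
  induction ls generalizing p with
  | nil => simp [pvMark] at h
  | cons l ls ih =>
    simp only [pvMark] at h
    split at h
    · simp only [Option.some.injEq, Prod.mk.injEq] at h
      obtain ⟨hp, hm2, hr⟩ := h; subst hp hm2 hr; rfl
    · cases hx : pvMark ls with
      | none => rw [hx] at h; simp at h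
      | some t =>
        obtain ⟨p', m', r'⟩ := t
        rw [hx] at h
        simp only [Option.map_some, Option.some.injEq, Prod.mk.injEq] at h
        obtain ⟨hp, hm2, hr⟩ := h
        subst hm2 hr; subst hp
        simpa using ih p' hx

theorem pv_filt_eq (ls : List String) (i : Int) (rem : List Int) :
    ((PySem.List.enumerate ls i).filter (fun p => !(rem.contains p.1))).map (·.2)
      = pvFilt ls i rem := by
  induction ls generalizing i with
  | nil => simp [PySem.List.enumerate_nil, pvFilt]
  | cons l ls ih =>
    rw [PySem.List.enumerate_cons]
    have ih' := ih (i + 1)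
    simp only [List.contains_eq_mem] at ih' ⊢
    by_cases h : i ∈ rem
    · simp [pvFilt, h, ih']
    · simp [pvFilt, h, ih']

theorem pv_filt_of_ge (ls : List String) (i : Int) (rem : List Int)
    (h : ∀ x ∈ rem, i + ls.length ≤ x) : pvFilt ls i rem = ls := by
  induction ls generalizing i with
  | nil => rfl
  | cons l ls ih =>
    have hmem : i ∉ rem := by
      intro hc
      have := h i hc
      simp only [List.length_cons] at this
      push_cast at this
      omega
    simp only [pvFilt]
    rw [if_neg (by simp [List.contains_eq_mem, hmem])]
    rw [ih (i + 1) (fun x hx => by have := h x hx; simp only [List.length_cons] at this; push_cast at this ⊢; omega)]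

theorem pv_filt_append (xs ys : List String) (i : Int) (rem : List Int) :
    pvFilt (xs ++ ys) i rem = pvFilt xs i rem ++ pvFilt ys (i + xs.length) rem := by
  induction xs generalizing i with
  | nil => simp [pvFilt]
  | cons l ls ih =>
    simp only [List.cons_append, pvFilt, ih (i + 1), List.length_cons]
    have : i + 1 + (ls.length : Int) = i + ((ls.length : Int) + 1) := by ring
    rw [this]
    push_cast
    split <;> simp

theorem pv_filt_drop_lt (ls : List String) (i j : Int) (rem : List Int) (h : j < i) :
    pvFilt ls i (j :: rem) = pvFilt ls i rem := by
  induction ls generalizing i with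
  | nil => rfl
  | cons l ls ih =>
    have : (j :: rem).contains i = rem.contains i := by
      simp only [List.contains_cons, Bool.or_eq_right_iff_imp]
      intro hij
      exact absurd (eq_of_beq hij) (by omega)
    rw [pvFilt, pvFilt, this, ih (i + 1) (by omega)]

theorem pv_filt_bad (r : List String) (i : Int) : pvFilt r i (pvBad r i) = pvKeep r := by
  induction r generalizing i with
  | nil => rfl
  | cons l ls ih =>
    by_cases h : PySem.Str.isIn "//" l = true
    · rw [pvKeep, if_pos h, pvBad, if_pos h]
      exact pv_filt_of_ge _ _ _ (by simp)
    · rw [pvKeep, if_neg h, pvBad, if_neg h, pvFilt,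
        if_pos (by simp),
        pv_filt_drop_lt _ _ _ _ (by omega), ih (i + 1)]

theorem pv_loopB_state2 (ls : List String) (txt : String) :
    pvLoopB ls 2 txt = ls := by
  induction ls with
  | nil => rfl
  | cons l ls ih => simp [pvLoopB, ih]

theorem pv_loopB_state1 (ls : List String) (txt : String) :
    pvLoopB ls 1 txt = pvKeep ls := by
  induction ls with
  | nil => rfl
  | cons l ls ih =>
    by_cases h : PySem.Str.isIn "//" l = true
    · simp at h
      simp [pvLoopB, pvKeep, h, pv_loopB_state2]
    · simp at h
      simp [pvLoopB, pvKeep, h, ih]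

theorem pv_loopB_none (ls : List String) (txt : String) (h : pvMark ls = none) :
    pvLoopB ls 0 txt = ls := by
  induction ls with
  | nil => rfl
  | cons l ls ih =>
    simp only [pvMark] at h
    split at h
    · exact absurd h (by simp)
    · rename_i hm
      have hm' : PySem.Str.isIn "//Background and Video events" l = false := by simpa using hm
      have h' : pvMark ls = none := by
        cases hx : pvMark ls
        · rfl
        · rw [hx] at h; simp at h
      have hm'' := hm'; simp at hm''
      simp [pvLoopB, hm'', ih h']

theorem pv_loopB_some (ls : List String) (txt : String) (p : List String)
    (m : String) (r : List String) (h : pvMark ls = some (p, m, r)) :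
    pvLoopB ls 0 txt = p ++ m :: txt :: pvKeep r := by
  induction ls generalizing p with
  | nil => simp [pvMark] at h
  | cons l ls ih =>
    simp only [pvMark] at h
    split at h
    · rename_i hm
      simp only [Option.some.injEq, Prod.mk.injEq] at h
      obtain ⟨hp, hm2, hr⟩ := h; subst hp hm2 hr
      have hm2 := hm; simp at hm2
      simp [pvLoopB, hm2, pv_loopB_state1]
    · rename_i hm
      have hm' : PySem.Str.isIn "//Background and Video events" l = false := by simpa using hm
      cases hx : pvMark ls with
      | none => rw [hx] at h; simp at h
      | some t =>
        obtain ⟨p', m', r'⟩ := t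
        rw [hx] at h
        simp only [Option.map_some, Option.some.injEq, Prod.mk.injEq] at h
        obtain ⟨hp, hm2, hr⟩ := h
        subst hm2 hr; subst hp
        have hm'' := hm'; simp at hm''
        simp [pvLoopB, hm'', ih p' hx]

-- A in the same normal form
theorem pv_A_eq (old_lines : List String) (new_text : String) :
    change_dot_osu_file_background_text old_lines new_text
      = match pvMark old_lines with
        | none => old_lines
        | some (p, m, r) =>
            p ++ m :: ((if (p.length : Int) ≠ 0 then
                [String.ofList (PySem.Chars.replace (new_text.toList ++ ['\n']) ['\n', '\n'] ['\n'])] else []) ++ pvKeep r) := by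
  cases hx : pvMark old_lines with
  | none =>
    unfold change_dot_osu_file_background_text
    rw [pv_loopA_none _ _ hx]
    simp
  | some t =>
    obtain ⟨p, m, r⟩ := t
    have hdec := pv_mark_decomp _ _ _ _ hx
    unfold change_dot_osu_file_background_text
    rw [pv_loopA_some _ 0 _ _ _ hx]
    simp only [zero_add]
    rw [pv_filt_eq]
    have hfilt : pvFilt old_lines 0 (pvBad r ((p.length : Int) + 1))
        = p ++ m :: pvKeep r := by
      rw [hdec, pv_filt_append]
      have h1 : pvFilt p 0 (pvBad r ((p.length : Int) + 1)) = p :=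
        pv_filt_of_ge _ _ _ (fun x hxm => by
          have := pv_mem_bad _ _ _ hxm; push_cast at this ⊢; omega)
      have h2 : pvFilt (m :: r) (0 + (p.length : Int)) (pvBad r ((p.length : Int) + 1))
          = m :: pvKeep r := by
        rw [zero_add]
        have hmem : (p.length : Int) ∉ pvBad r ((p.length : Int) + 1) := by
          intro hc
          have := pv_mem_bad _ _ _ hc
          omega
        simp only [pvFilt]
        rw [if_neg (by simp [List.contains_eq_mem, hmem])]
        rw [pv_filt_bad]
      rw [h1, h2]
    rw [hfilt]
    by_cases hz : (p.length : Int) ≠ 0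
    · rw [if_pos hz, if_pos hz]
      have : p ++ m :: pvKeep r = (p ++ [m]) ++ pvKeep r := by simp
      rw [this]
      have hcast : (p.length : Int) + 1 = (((p ++ [m]).length : Nat) : Int) := by
        simp
      rw [hcast, PySem.List.insert_natCast _ _ _ (by simp)]
      rw [List.take_left' rfl, List.drop_left' rfl]
      simp
    · rw [if_neg hz, if_neg hz]
      simp

-- on inputs outside D_, the marker (if any) is not at index 0, i.e. pvMark's prefix is nonempty
-- if pvMark returns an empty prefix, the first line is the marker line
theorem pv_mark_nilpre (ls : List String) (m : String) (r : List String)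
    (h : pvMark ls = some ([], m, r)) :
    ls = m :: r ∧ PySem.Str.isIn "//Background and Video events" m = true := by
  cases ls with
  | nil => simp [pvMark] at h
  | cons l ls' =>
    simp only [pvMark] at h
    split at h
    · rename_i hm
      simp only [Option.some.injEq, Prod.mk.injEq] at h
      obtain ⟨_, hm2, hr⟩ := h
      subst hm2 hr
      exact ⟨rfl, hm⟩
    · cases hy : pvMark ls'
      · rw [hy] at h; simp at h
      · rw [hy] at h; simp at h

theorem pv_notD_prefix_ne (old_lines : List String) (new_text : String)
    (hD : ¬ D_change_dot_osu_file_background_text old_lines new_text)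
    (p : List String) (m : String) (r : List String)
    (h : pvMark old_lines = some (p, m, r)) : p ≠ [] := by
  intro hp
  subst hp
  obtain ⟨hdec, hm⟩ := pv_mark_nilpre _ _ _ h
  apply hD
  unfold D_change_dot_osu_file_background_text
  rw [hdec]
  simpa using hm

theorem pv_D_mark (old_lines : List String) (new_text : String)
    (hD : D_change_dot_osu_file_background_text old_lines new_text) :
    ∃ l ls, old_lines = l :: ls ∧ pvMark old_lines = some ([], l, ls) := by
  cases hx : old_lines with
  | nil =>
    exfalso
    unfold D_change_dot_osu_file_background_text at hD
    rw [hx] at hD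
    revert hD
    decide
  | cons l ls =>
    refine ⟨l, ls, rfl, ?_⟩
    unfold D_change_dot_osu_file_background_text at hD
    rw [hx] at hD
    simp only [List.headD_cons] at hD
    simp only [pvMark]
    rw [if_pos hD]

-- ===== VERDICT (by name: the statement is the Claim_ definition above) =====
theorem change_dot_osu_file_background_text_spec : Claim_unchanged_change_dot_osu_file_background_text := by
  intro old_lines new_text _
  unfold Spec_change_dot_osu_file_background_text
  intro hD
  rw [pv_A_eq]
  unfold change_dot_osu_file_background_text_alt
  cases hx : pvMark old_lines with
  | none =>
    rw [pv_loopB_none _ _ hx]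
  | some t =>
    obtain ⟨p, m, r⟩ := t
    rw [pv_loopB_some _ _ _ _ _ hx]
    have hp := pv_notD_prefix_ne _ _ hD _ _ _ hx
    simp [hp]

theorem change_dot_osu_file_background_text_changed : Claim_changed_change_dot_osu_file_background_text := by
  unfold Claim_changed_change_dot_osu_file_background_text; decide

theorem change_dot_osu_file_background_text_tight : Claim_exact_change_dot_osu_file_background_text := by
  intro old_lines new_text _ hD
  obtain ⟨l, ls, hol, hmark⟩ := pv_D_mark old_lines new_text hD
  rw [pv_A_eq]
  unfold change_dot_osu_file_background_text_alt
  rw [hmark, pv_loopB_some _ _ _ _ _ hmark]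
  simp only [List.length_nil, Nat.cast_zero, ne_eq, not_true_eq_false, ite_false,
    List.nil_append]
  intro hc
  have := congrArg List.length hc
  simp at this
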